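-- pv_equiv track=rewrite | github.com/erdc/pyuit | uit/uit.py | _parse_hpc_headers
-- ===== SOURCE A (Python) =====
-- def _parse_hpc_headers(header_lines, delimiter):
--     col_start = 0
--     columns = []
--     for column_header in delimiter.split():
--         col_width = len(column_header)
--         col_end = col_start + col_width + 1
--         col_name = []
--         for line in header_lines:
--             if line:
--                 name_part = line[col_start: col_end].strip()
--                 if name_part:
--                     col_name.append(name_part.lower().replace(' ', '_'))
--         columns.append('_'.join(col_name))
--         col_start = col_end
--     return columns
-- ===== SOURCE B (Python) =====
-- def _parse_hpc_headers(header_lines, delimiter):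
--     # Recursive prefix-chopping: peel the leading column off every line at each
--     # step (consuming widths of the remaining header tokens), instead of slicing
--     # with running start/end offsets.
--     def go(tokens, lines):
--         if not tokens:
--             return []
--         w = len(tokens[0]) + 1
--         names = []
--         rests = []
--         for line in lines:
--             frag = line[:w].strip()
--             if frag:
--                 names.append(frag.lower().replace(' ', '_'))
--             rests.append(line[w:])
--         return ['_'.join(names)] + go(tokens[1:], rests)
--     return go(delimiter.split(), [l for l in header_lines if l])
-- ===== Notes on version B (the rewrite author's own statement) =====
-- stated objective: alternative
-- what changed: B replaces A's offset bookkeeping (running col_start/col_end slices into the full lines) with a recursion over the header tokens that at each step chops the leading column prefix off every remaining line, so the maintained data is the list of shrinking line remainders and no start/end indices exist at all.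
import Mathlib
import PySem

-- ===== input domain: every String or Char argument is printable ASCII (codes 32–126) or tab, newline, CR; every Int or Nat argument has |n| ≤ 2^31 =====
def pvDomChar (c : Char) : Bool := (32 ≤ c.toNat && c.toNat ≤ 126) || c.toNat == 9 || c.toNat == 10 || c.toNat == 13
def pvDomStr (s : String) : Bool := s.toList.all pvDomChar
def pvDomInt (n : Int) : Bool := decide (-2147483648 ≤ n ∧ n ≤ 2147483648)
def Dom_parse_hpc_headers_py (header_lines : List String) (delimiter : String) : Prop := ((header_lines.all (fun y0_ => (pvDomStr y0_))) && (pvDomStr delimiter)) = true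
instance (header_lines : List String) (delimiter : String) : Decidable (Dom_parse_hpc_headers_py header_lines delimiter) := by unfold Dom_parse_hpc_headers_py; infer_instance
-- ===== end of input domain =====

-- B recursively peels the leading column off every line (chopping consumed
-- prefixes), instead of A's offset bookkeeping over whole lines; alternative
-- decomposition, same cost, identical return value.

-- ===== PORT A =====
-- literal transliteration of A: column-major nested fold, running col_start in the state
def parse_hpc_headers_py (header_lines : List String) (delimiter : String) : List String :=
  ((PySem.Str.split₀ delimiter).foldl (fun (st : Int × List String) (column_header : String) =>
      let col_start := st.1
      let col_width : Int := (PySem.Str.len column_header : Int)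
      let col_end := col_start + col_width + 1
      let col_name := header_lines.foldl (fun (acc : List String) (line : String) =>
          if line ≠ "" then
            let name_part := PySem.Str.strip (PySem.Str.slice line (some col_start) (some col_end))
            if name_part ≠ "" then
              acc ++ [PySem.Str.replace (PySem.Str.lower name_part) " " "_"]
            else acc
          else acc) ([] : List String)
      (col_end, st.2 ++ [PySem.Str.join "_" col_name])) ((0 : Int), ([] : List String))).2

-- ===== PORT B =====
-- transliteration of B's recursive helper `go`: peel one column (width = len(token)+1)
-- off the front of every line, recurse on the chopped remainders and remaining tokens
def pvGoB (tokens : List String) (lines : List String) : List String :=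
  match tokens with
  | [] => []
  | t :: ts =>
      let w : Int := PySem.Str.len t + 1
      let nr := lines.foldl (fun (st : List String × List String) (line : String) =>
          let frag := PySem.Str.strip (PySem.Str.slice line none (some w))
          let names := if frag ≠ "" then st.1 ++ [PySem.Str.replace (PySem.Str.lower frag) " " "_"] else st.1
          (names, st.2 ++ [PySem.Str.slice line (some w) none]))
        (([] : List String), ([] : List String))
      [PySem.Str.join "_" nr.1] ++ pvGoB ts nr.2

def parse_hpc_headers_py_alt (header_lines : List String) (delimiter : String) : List String :=
  pvGoB (PySem.Str.split₀ delimiter) (header_lines.filter (fun l => l != ""))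

-- ===== PRECONDITION & SPEC =====
def Spec_parse_hpc_headers_py (header_lines : List String) (delimiter : String) (out : List String) : Prop := out = parse_hpc_headers_py_alt header_lines delimiter
instance (header_lines : List String) (delimiter : String) (out : List String) : Decidable (Spec_parse_hpc_headers_py header_lines delimiter out) := by unfold Spec_parse_hpc_headers_py; infer_instance

-- ===== CLAIM (what is proved, stated in full; the proofs are below) =====
def Claim_equal_parse_hpc_headers_py : Prop := ∀ (header_lines : List String) (delimiter : String), Dom_parse_hpc_headers_py header_lines delimiter → Spec_parse_hpc_headers_py header_lines delimiter (parse_hpc_headers_py header_lines delimiter)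

-- ===== LEMMAS AND PROOFS =====

-- contribution of one line to one column (A's inner-loop body)
def pvContrib (line : String) (s e : Int) : List String :=
  if line ≠ "" then
    (let np := PySem.Str.strip (PySem.Str.slice line (some s) (some e))
     if np ≠ "" then [PySem.Str.replace (PySem.Str.lower np) " " "_"] else [])
  else []

-- the list of name parts one column collects over the lines (A side)
def pvColNames : List String → Int → Int → List String
  | [], _, _ => []
  | l :: ls, s, e => pvContrib l s e ++ pvColNames ls s e

-- B side: name parts of the column [s, e) over already-filtered lines (no emptiness check)
def pvColB : List String → Nat → Nat → List String
  | [], _, _ => []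
  | l :: ls, s, e =>
      (let np := PySem.Str.strip (PySem.Str.slice l (some (s : Int)) (some (e : Int)))
       if np ≠ "" then [PySem.Str.replace (PySem.Str.lower np) " " "_"] else []) ++ pvColB ls s e

-- fragments B's fold extracts from (already chopped) lines with width w
def pvFrags (w : Nat) : List String → List String
  | [] => []
  | l :: ls =>
      (let frag := PySem.Str.strip (PySem.Str.slice l none (some (w : Int)))
       if frag ≠ "" then [PySem.Str.replace (PySem.Str.lower frag) " " "_"] else []) ++ pvFrags w ls

-- the column boundary table, in Nat
def pvBoundsN : List String → Nat → List (Nat × Nat)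
  | [], _ => []
  | ch :: chs, s =>
      (s, s + ch.toList.length + 1) :: pvBoundsN chs (s + ch.toList.length + 1)

-- slice composition facts (Python: l[s:][: w] = l[s : s+w], l[s:][w:] = l[s+w:], l[0:] = l)
theorem pvSliceChopTake (l : String) (s w : Nat) :
    PySem.Str.slice (PySem.Str.slice l (some (s : Int)) none) none (some (w : Int))
      = PySem.Str.slice l (some (s : Int)) (some ((s + w : Nat) : Int)) := by
  apply String.toList_inj.mp
  simp only [PySem.Str.toList_slice, PySem.Chars.slice_eq_listSlice]
  rw [PySem.List.slice_from_natCast, PySem.List.slice_to_natCast, Nat.cast_add,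
    PySem.List.slice_natCast_add]
theorem pvSliceChopDrop (l : String) (s w : Nat) :
    PySem.Str.slice (PySem.Str.slice l (some (s : Int)) none) (some (w : Int)) none
      = PySem.Str.slice l (some ((s + w : Nat) : Int)) none := by
  apply String.toList_inj.mp
  simp only [PySem.Str.toList_slice, PySem.Chars.slice_eq_listSlice,
    PySem.List.slice_from_natCast, List.drop_drop]
theorem pvSliceZero (l : String) :
    PySem.Str.slice l (some (0 : Int)) none = l := by
  apply String.toList_inj.mp
  simp [PySem.Str.toList_slice, PySem.Chars.slice_eq_listSlice, PySem.List.slice_none_none]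

-- A's inner fold over the lines collects pvColNames
theorem pvInnerA (header_lines : List String) (s e : Int) :
    ∀ acc : List String,
      header_lines.foldl (fun (acc : List String) (line : String) =>
          if line ≠ "" then
            let name_part := PySem.Str.strip (PySem.Str.slice line (some s) (some e))
            if name_part ≠ "" then
              acc ++ [PySem.Str.replace (PySem.Str.lower name_part) " " "_"]
            else acc
          else acc) acc = acc ++ pvColNames header_lines s e := by
  induction header_lines with
  | nil => intro acc; simp [pvColNames]
  | cons l ls ih =>
      intro acc
      simp only [List.foldl_cons, pvColNames, pvContrib]
      rw [ih]
      split_ifs <;> simp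

-- A's outer fold produces the boundary-indexed joins
theorem pvAChar (header_lines : List String) (chs : List String) :
    ∀ (start : Nat) (cols : List String),
      (chs.foldl (fun (st : Int × List String) (column_header : String) =>
        let col_start := st.1
        let col_width : Int := (PySem.Str.len column_header : Int)
        let col_end := col_start + col_width + 1
        let col_name := header_lines.foldl (fun (acc : List String) (line : String) =>
            if line ≠ "" then
              let name_part := PySem.Str.strip (PySem.Str.slice line (some col_start) (some col_end))
              if name_part ≠ "" then
                acc ++ [PySem.Str.replace (PySem.Str.lower name_part) " " "_"]
              else acc
            else acc) ([] : List String)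
        (col_end, st.2 ++ [PySem.Str.join "_" col_name])) (((start : Nat) : Int), cols)).2
      = cols ++ (pvBoundsN chs start).map
          (fun b => PySem.Str.join "_" (pvColNames header_lines (b.1 : Int) (b.2 : Int))) := by
  induction chs with
  | nil => intro start cols; simp [pvBoundsN]
  | cons ch chs ih =>
      intro start cols
      simp only [List.foldl_cons, pvBoundsN, List.map_cons]
      have hcast : ((start : Nat) : Int) + PySem.Str.len ch + 1
          = ((start + ch.toList.length + 1 : Nat) : Int) := by
        rw [PySem.Str.len_eq]; push_cast; ring
      rw [hcast, ih, pvInnerA]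
      simp

-- A's per-column names over all lines = B's per-column names over the filtered lines
theorem pvColFilter (ls : List String) (s e : Nat) :
    pvColNames ls (s : Int) (e : Int) = pvColB (ls.filter (fun l => l != "")) s e := by
  induction ls with
  | nil => simp [pvColNames, pvColB]
  | cons l ls ih =>
      by_cases hl : l = ""
      · subst hl
        simp [pvColNames, pvContrib, ih]
      · simp [pvColNames, pvContrib, pvColB, hl, ih]

-- B's fold over the lines returns (fragments, chopped remainders)
theorem pvBInner (w : Nat) (ls : List String) :
    ∀ (names rests : List String),
      ls.foldl (fun (st : List String × List String) (line : String) =>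
          let frag := PySem.Str.strip (PySem.Str.slice line none (some ((w : Nat) : Int)))
          let nm := if frag ≠ "" then st.1 ++ [PySem.Str.replace (PySem.Str.lower frag) " " "_"] else st.1
          (nm, st.2 ++ [PySem.Str.slice line (some ((w : Nat) : Int)) none])) (names, rests)
      = (names ++ pvFrags w ls,
         rests ++ ls.map (fun l => PySem.Str.slice l (some ((w : Nat) : Int)) none)) := by
  induction ls with
  | nil => intro names rests; simp [pvFrags]
  | cons l ls ih =>
      intro names rests
      simp only [List.foldl_cons, pvFrags, List.map_cons]
      rw [ih]
      split_ifs <;> simp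

-- fragments of chopped lines are the column [s, s+w) of the originals
theorem pvFragsShift (w s : Nat) (ls : List String) :
    pvFrags w (ls.map (fun l => PySem.Str.slice l (some (s : Int)) none))
      = pvColB ls s (s + w) := by
  induction ls with
  | nil => simp [pvFrags, pvColB]
  | cons l ls ih =>
      simp only [List.map_cons, pvFrags, pvColB, pvSliceChopTake, ih]

-- B's recursion over shifted lines produces the boundary-indexed joins
theorem pvGoSpec (tokens : List String) :
    ∀ (s : Nat) (ls : List String),
      pvGoB tokens (ls.map (fun l => PySem.Str.slice l (some (s : Int)) none))
      = (pvBoundsN tokens s).map (fun b => PySem.Str.join "_" (pvColB ls b.1 b.2)) := by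
  induction tokens with
  | nil => intro s ls; simp [pvGoB, pvBoundsN]
  | cons t ts ih =>
      intro s ls
      simp only [pvGoB, pvBoundsN, List.map_cons]
      have hw : PySem.Str.len t + 1 = ((t.toList.length + 1 : Nat) : Int) := by
        rw [PySem.Str.len_eq]; push_cast; ring
      rw [hw, pvBInner, pvFragsShift]
      simp only [List.nil_append]
      rw [List.map_map]
      have hmm : ((fun l => PySem.Str.slice l (some ((t.toList.length + 1 : Nat) : Int)) none) ∘
          (fun l => PySem.Str.slice l (some (s : Int)) none))
          = fun l => PySem.Str.slice l (some ((s + (t.toList.length + 1) : Nat) : Int)) none := by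
        funext l
        simpa [Function.comp] using pvSliceChopDrop l s (t.toList.length + 1)
      rw [hmm, ih]
      have : s + (t.toList.length + 1) = s + t.toList.length + 1 := by omega
      rw [this]
      simp

-- ===== VERDICT (by name: the statement is the Claim_ definition above) =====
theorem parse_hpc_headers_py_spec : Claim_equal_parse_hpc_headers_py := by
  intro header_lines delimiter _
  unfold Spec_parse_hpc_headers_py parse_hpc_headers_py parse_hpc_headers_py_alt
  have hA := pvAChar header_lines (PySem.Str.split₀ delimiter) 0 []
  simp only [Nat.cast_zero, List.nil_append] at hA
  rw [hA]
  have hB := pvGoSpec (PySem.Str.split₀ delimiter) 0 (header_lines.filter (fun l => l != ""))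
  simp only [Nat.cast_zero, pvSliceZero, List.map_id'] at hB
  rw [hB]
  apply List.map_congr_left
  intro b _
  rw [pvColFilter]
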